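-- pv_equiv track=rewrite | github.com/peterwoo14/CPE101 | wordsearch.py | no_good
-- ===== SOURCE A (Python) =====
-- def no_good(index: int, row_len: int):
--     """This function assures valid index for searches
--     Args:
--         index(int): Index of the start of the word found from find
--         row_len(int): Number of characters per row
--
--     Return:
--         int: Same input index if valid and -1 if invalid
--     """
--     i = 1
--     while i <= row_len:
--         no_good = (row_len * i) - 1
--         if index == no_good:
--             return -1
--         i += 1
--     return index
-- ===== SOURCE B (Python) =====
-- def no_good(index: int, row_len: int):
--     if row_len > 0 and (index + 1) % row_len == 0 and 1 <= (index + 1) // row_len <= row_len: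
--         return -1
--     return index
-- ===== Notes on version B (the rewrite author's own statement) =====
-- stated objective: faster
-- what changed: Replaced the O(row_len) loop scanning every row-end position with a single O(1) divisibility-and-quotient check on index+1.
import Mathlib
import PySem

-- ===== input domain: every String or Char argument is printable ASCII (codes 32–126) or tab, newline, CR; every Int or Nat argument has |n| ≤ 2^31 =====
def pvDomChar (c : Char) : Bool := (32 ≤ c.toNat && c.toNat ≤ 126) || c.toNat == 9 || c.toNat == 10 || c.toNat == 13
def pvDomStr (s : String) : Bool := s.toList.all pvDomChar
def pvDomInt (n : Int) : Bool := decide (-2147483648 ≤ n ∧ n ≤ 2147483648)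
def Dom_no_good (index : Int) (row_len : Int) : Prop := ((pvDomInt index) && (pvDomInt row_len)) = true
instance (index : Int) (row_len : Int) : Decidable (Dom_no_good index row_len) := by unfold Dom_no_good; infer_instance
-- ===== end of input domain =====

-- B replaces A's O(row_len) scan of row-end positions by a single O(1) divisibility/quotient check (faster, asymptotic).


-- ===== PORT A =====
-- while-loop: i counts up from 1 while i ≤ row_len
def noGoodLoop (index : Int) (row_len : Int) (i : Int) : Int :=
  if _h : i ≤ row_len then
    if index = row_len * i - 1 then -1
    else noGoodLoop index row_len (i + 1)
  else index
termination_by (row_len + 1 - i).toNat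
decreasing_by omega

def no_good (index : Int) (row_len : Int) : Int :=
  noGoodLoop index row_len 1

-- ===== PORT B =====
def no_good_alt (index : Int) (row_len : Int) : Int :=
  if 0 < row_len ∧ PySem.Int.mod (index + 1) row_len = 0 ∧
      (1 ≤ PySem.Int.floordiv (index + 1) row_len ∧ PySem.Int.floordiv (index + 1) row_len ≤ row_len) then
    -1
  else index

-- ===== PRECONDITION & SPEC =====
def Spec_no_good (index : Int) (row_len : Int) (out : Int) : Prop := out = no_good_alt index row_len
instance (index : Int) (row_len : Int) (out : Int) : Decidable (Spec_no_good index row_len out) := by unfold Spec_no_good; infer_instance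

-- ===== CLAIM (what is proved, stated in full; the proofs are below) =====
def Claim_equal_no_good : Prop := ∀ (index : Int) (row_len : Int), Dom_no_good index row_len → Spec_no_good index row_len (no_good index row_len)

-- ===== LEMMAS AND PROOFS =====
lemma noGoodLoop_eq (index row_len i : Int) (hi : 1 ≤ i) :
    noGoodLoop index row_len i =
      if 0 < row_len ∧ (index + 1) % row_len = 0 ∧
          (i ≤ (index + 1) / row_len ∧ (index + 1) / row_len ≤ row_len) then -1 else index := by
  fun_induction noGoodLoop index row_len i with
  | case1 i h hEq =>
      -- index = row_len * i - 1 : the loop returns -1, and the divisibility condition holds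
      have hr : 0 < row_len := by omega
      have h1 : index + 1 = row_len * i := by omega
      have hq : (index + 1) / row_len = i := by
        rw [h1, Int.mul_ediv_cancel_left _ (ne_of_gt hr)]
      have hm : (index + 1) % row_len = 0 := by
        rw [h1]; exact Int.mul_emod_right _ _
      rw [if_pos ⟨hr, hm, by omega, by omega⟩]
  | case2 i h hEq ih =>
      rw [ih (by omega)]
      by_cases hr : 0 < row_len
      · by_cases hm : (index + 1) % row_len = 0
        · have hq : row_len * ((index + 1) / row_len) = index + 1 := by
            have := Int.emod_add_mul_ediv (index + 1) row_len
            omega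
          have hne : (index + 1) / row_len ≠ i := by
            intro hqi
            apply hEq
            rw [hqi] at hq
            omega
          split_ifs with h1 h2 h2 <;> first | rfl | (exfalso; omega)
        · simp [hm]
      · simp [hr]
  | case3 i h =>
      have : ¬ (0 < row_len ∧ (index + 1) % row_len = 0 ∧
          (i ≤ (index + 1) / row_len ∧ (index + 1) / row_len ≤ row_len)) := by
        rintro ⟨_, _, hle, hle2⟩; omega
      rw [if_neg this]

-- ===== VERDICT (by name: the statement is the Claim_ definition above) =====
theorem no_good_spec : Claim_equal_no_good := by
  intro index row_len _
  unfold Spec_no_good no_good no_good_alt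
  rw [noGoodLoop_eq index row_len 1 le_rfl]
  by_cases hr : 0 < row_len
  · rw [PySem.Int.mod_eq_emod_of_pos hr, PySem.Int.floordiv_eq_ediv_of_pos hr]
  · simp [hr]
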